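-- pv_equiv track=rewrite | github.com/awslabs/amazon-redshift-utils | src/UnloadCopyUtility/util/sql/sql_text_helpers.py | get_first_double_quoted_identifier
-- ===== SOURCE A (Python) =====
-- def get_first_double_quoted_identifier(string):
--     if '"' not in string:
--         raise ValueError('No double quote in {s} so cannot get first double quoted identifier.'.format(s=string))
--     start_pos = string.find('"')
--     pos = start_pos + 1
--     while pos < len(string):
--         if string[pos] == '"' and pos + 1 < len(string) and string[pos+1] == '"':
--             pos += 2
--         elif string[pos] == '"' and (pos + 1 == len(string) or string[pos+1] != '"'):
--             break
--         else:
--             pos += 1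
--     return string[start_pos:pos + 1]
-- ===== SOURCE B (Python) =====
-- def get_first_double_quoted_identifier(string):
--     i = string.find('"')
--     if i == -1:
--         raise ValueError('No double quote in {s} so cannot get first double quoted identifier.'.format(s=string))
--     out = ['"']
--     chars = iter(string[i + 1:])
--     for ch in chars:
--         if ch != '"':
--             out.append(ch)
--         elif next(chars, None) == '"':
--             out.append('""')
--         else:
--             out.append('"')
--             break
--     return ''.join(out)
-- ===== Notes on version B (the rewrite author's own statement) =====
-- stated objective: idiomatic
-- what changed: Replaces A's integer-position while-loop over the whole string plus a final slice with a single forward iterator pass over the tail after the first quote that builds the result list directly (consuming the escape partner via next()).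
-- outside the precondition, e.g. on get_first_double_quoted_identifier('select x from t'): A raises ValueError, B raises ValueError
import Mathlib
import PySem

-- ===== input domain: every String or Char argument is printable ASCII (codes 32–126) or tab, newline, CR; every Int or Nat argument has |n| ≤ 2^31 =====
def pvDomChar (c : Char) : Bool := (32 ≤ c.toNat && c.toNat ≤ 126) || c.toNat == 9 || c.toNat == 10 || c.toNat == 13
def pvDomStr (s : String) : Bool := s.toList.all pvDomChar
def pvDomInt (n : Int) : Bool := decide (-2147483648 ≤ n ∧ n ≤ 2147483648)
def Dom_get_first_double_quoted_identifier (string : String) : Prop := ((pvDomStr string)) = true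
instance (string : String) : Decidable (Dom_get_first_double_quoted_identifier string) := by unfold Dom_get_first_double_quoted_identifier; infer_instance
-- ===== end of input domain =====

-- B replaces A's integer-position while-loop-and-slice with a single iterator pass over the
-- tail after the first quote, building the output directly (objective: idiomatic/alternative).

-- ===== PORT A =====
-- the while loop of A: advances pos until break or pos = len, returns the final pos
def pvLoopA (cs : List Char) (pos : Nat) : Nat :=
  if h : pos < cs.length then
    if PySem.List.pyGetD cs (pos : Int) ' ' = '"' ∧ pos + 1 < cs.length ∧
        PySem.List.pyGetD cs ((pos : Int) + 1) ' ' = '"' then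
      pvLoopA cs (pos + 2)
    else if PySem.List.pyGetD cs (pos : Int) ' ' = '"' ∧
        (pos + 1 = cs.length ∨ PySem.List.pyGetD cs ((pos : Int) + 1) ' ' ≠ '"') then
      pos                                   -- break
    else
      pvLoopA cs (pos + 1)
  else pos
termination_by cs.length - pos

def get_first_double_quoted_identifier (string : String) : String :=
  -- '"' not in string raises ValueError: excluded by Pre_
  let cs := string.toList
  let start_pos := (PySem.Chars.find cs ['"']).toNat
  let pos := pvLoopA cs (start_pos + 1)
  String.ofList (PySem.List.slice cs (some (start_pos : Int)) (some ((pos : Int) + 1)))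

-- ===== PORT B =====
-- the for-loop over the iterator: ch ≠ '"' is copied, a lone/final '"' closes, '""' is kept
def pvScanB (rest : List Char) : List Char :=
  match rest with
  | [] => []
  | c :: r =>
    if c ≠ '"' then c :: pvScanB r
    else
      match r with
      | d :: r' => if d = '"' then '"' :: '"' :: pvScanB r' else ['"']
      | [] => ['"']

def get_first_double_quoted_identifier_alt (string : String) : String :=
  let cs := string.toList
  let i := PySem.Chars.find cs ['"']
  -- i = -1 raises ValueError: excluded by Pre_
  String.ofList ('"' :: pvScanB (PySem.List.slice cs (some (i + 1)) none))

-- ===== PRECONDITION & SPEC =====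
-- Pre_ excludes exactly the strings with no double quote, on which both A and B raise ValueError
def Pre_get_first_double_quoted_identifier (string : String) : Prop :=
  PySem.Str.isIn "\"" string = true
instance (string : String) : Decidable (Pre_get_first_double_quoted_identifier string) := by
  unfold Pre_get_first_double_quoted_identifier; infer_instance

def pvWitness_get_first_double_quoted_identifier : String := "select \"a\"\"b\" from t"

def Spec_get_first_double_quoted_identifier (string : String) (out : String) : Prop := out = get_first_double_quoted_identifier_alt string
instance (string : String) (out : String) : Decidable (Spec_get_first_double_quoted_identifier string out) := by unfold Spec_get_first_double_quoted_identifier; infer_instance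

-- ===== CLAIM (what is proved, stated in full; the proofs are below) =====
def Claim_equal_get_first_double_quoted_identifier : Prop := ∀ (string : String), Dom_get_first_double_quoted_identifier string → Pre_get_first_double_quoted_identifier string → Spec_get_first_double_quoted_identifier string (get_first_double_quoted_identifier string)

-- ===== LEMMAS AND PROOFS =====

-- A's loop from pos ≤ len never moves back, and the segment it selects is exactly what B's scan builds
theorem pvLoopA_spec (cs : List Char) (pos : Nat) (h : pos ≤ cs.length) :
    pos ≤ pvLoopA cs pos ∧
      (cs.drop pos).take (pvLoopA cs pos - pos + 1) = pvScanB (cs.drop pos) := by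
  rw [pvLoopA]
  by_cases hlt : pos < cs.length
  · have hc1 : ((pos : Int) + 1) = ((pos + 1 : Nat) : Int) := by push_cast; ring
    simp only [dif_pos hlt, hc1, PySem.List.pyGetD_natCast]
    have hgd : cs.getD pos ' ' = cs[pos] := List.getD_eq_getElem ..
    have hd : cs.drop pos = cs[pos] :: cs.drop (pos + 1) := (List.getElem_cons_drop ..).symm
    split_ifs with hA hB
    · -- escape: "" consumed, recurse at pos+2
      obtain ⟨hq, hlt2, hq2⟩ := hA
      rw [hgd] at hq
      have hgd2 : cs.getD (pos + 1) ' ' = cs[pos + 1] := List.getD_eq_getElem ..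
      rw [hgd2] at hq2
      have hd2 : cs.drop (pos + 1) = cs[pos + 1] :: cs.drop (pos + 2) :=
        (List.getElem_cons_drop ..).symm
      obtain ⟨hle, htk⟩ := pvLoopA_spec cs (pos + 2) (by omega)
      refine ⟨by omega, ?_⟩
      rw [hd, hd2, hq, hq2]
      have h1 : pvLoopA cs (pos + 2) - pos + 1 = (pvLoopA cs (pos + 2) - (pos + 2) + 1) + 1 + 1 := by
        omega
      rw [h1, List.take_succ_cons, List.take_succ_cons, htk]
      simp [pvScanB]
    · -- break: lone (or final) quote closes
      obtain ⟨hq, hB2⟩ := hB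
      rw [hgd] at hq
      refine ⟨le_refl _, ?_⟩
      rw [hd, hq]
      simp only [Nat.sub_self, List.take_succ_cons, List.take_zero]
      by_cases hlen : pos + 1 < cs.length
      · have hd2 : cs.drop (pos + 1) = cs[pos + 1] :: cs.drop (pos + 2) :=
          (List.getElem_cons_drop ..).symm
        have hgd2 : cs.getD (pos + 1) ' ' = cs[pos + 1] := List.getD_eq_getElem ..
        have hne : cs[pos + 1] ≠ '"' := by
          rcases hB2 with h' | h'
          · omega
          · rw [hgd2] at h'; exact h'
        rw [hd2]
        simp [pvScanB, hne]
      · have hnil : cs.drop (pos + 1) = [] := List.drop_of_length_le (by omega)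
        rw [hnil]
        simp [pvScanB]
    · -- ordinary character, recurse at pos+1
      have hne : cs[pos] ≠ '"' := by
        intro hq
        rw [hgd] at hA hB
        refine hB ⟨hq, ?_⟩
        by_cases h2 : pos + 1 < cs.length
        · exact Or.inr (fun hq2 => hA ⟨hq, h2, hq2⟩)
        · exact Or.inl (by omega)
      obtain ⟨hle, htk⟩ := pvLoopA_spec cs (pos + 1) (by omega)
      refine ⟨by omega, ?_⟩
      have hsc : pvScanB (cs[pos] :: cs.drop (pos + 1)) = cs[pos] :: pvScanB (cs.drop (pos + 1)) := by
        rw [pvScanB.eq_def]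
        simp [hne]
      rw [hd]
      have h1 : pvLoopA cs (pos + 1) - pos + 1 = (pvLoopA cs (pos + 1) - (pos + 1) + 1) + 1 := by
        omega
      rw [h1, List.take_succ_cons, htk, hsc]
  · simp only [dif_neg hlt]
    have hnil : cs.drop pos = [] := List.drop_of_length_le (by omega)
    rw [hnil]
    simp [pvScanB]
termination_by cs.length - pos

-- ===== VERDICT (by name: the statement is the Claim_ definition above) =====
theorem get_first_double_quoted_identifier_spec : Claim_equal_get_first_double_quoted_identifier := by
  intro s _ hpre
  unfold Spec_get_first_double_quoted_identifier
  set cs := s.toList with hcs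
  have hinfix : ['"'] <:+: cs := by
    have := (PySem.Str.isIn_iff_infix "\"" s).mp hpre
    simpa using this
  have hf : 0 ≤ PySem.Chars.find cs ['"'] := (PySem.Chars.find_nonneg_iff cs ['"']).mpr hinfix
  set start := (PySem.Chars.find cs ['"']).toNat with hstart
  have hpref : ['"'] <+: cs.drop start := (PySem.Chars.find_spec hf).1
  obtain ⟨rest0, hrest0⟩ := hpref
  have hdropstart : cs.drop start = '"' :: rest0 := hrest0.symm
  have hslt : start < cs.length := by
    by_contra hge
    have : cs.drop start = [] := List.drop_of_length_le (by omega)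
    rw [this] at hdropstart; exact (List.cons_ne_nil _ _ hdropstart.symm)
  have hrest : cs.drop (start + 1) = rest0 := by
    have := congrArg List.tail hdropstart
    simpa [List.tail_drop] using this
  obtain ⟨hle, htk⟩ := pvLoopA_spec cs (start + 1) (by omega)
  set e := pvLoopA cs (start + 1) with he
  have hcast : PySem.Chars.find cs ['"'] + 1 = ((start + 1 : Nat) : Int) := by
    push_cast
    omega
  have hcast2 : ((e : Int) + 1) = ((e + 1 : Nat) : Int) := by push_cast; ring
  have hAeq : get_first_double_quoted_identifier s =
      String.ofList (PySem.List.slice cs (some (start : Int)) (some ((e : Int) + 1))) := rfl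
  have hBeq : get_first_double_quoted_identifier_alt s =
      String.ofList ('"' :: pvScanB
        (PySem.List.slice cs (some (PySem.Chars.find cs ['"'] + 1)) none)) := rfl
  rw [hAeq, hBeq, hcast, hcast2, PySem.List.slice_from_natCast, PySem.List.slice_natCast, hrest]
  rw [hdropstart]
  have h1 : e + 1 - start = (e - (start + 1) + 1) + 1 := by omega
  rw [h1, List.take_succ_cons]
  rw [hrest] at htk
  rw [htk]
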